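-- pv_equiv track=rewrite | github.com/noyahoch/CreativeLM | scripts/holistic_experiment_comparison.py | _match_judge_method
-- ===== SOURCE A (Python) =====
-- def _match_judge_method(
--     method: str,
--     folders: list[str],
--     all_real_folders: set[str] | None = None,
-- ) -> tuple[str, str] | None:
--     """Split a judge method name into (folder, run) using the known folder list.
--
--     Folders are tried longest-first so that e.g. ``llama_t07_dbanal_clustered_2``
--     matches before ``llama_t07_dbanal_clustered``.
--
--     When *all_real_folders* is provided, a candidate match is rejected if a
--     longer real folder also matches — this prevents ``llama_t07`` from
--     accidentally claiming methods that belong to ``llama_t07_dbanal_negd``.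
--     """
--     for folder in folders:
--         prefix = folder + "_"
--         if method.startswith(prefix):
--             if all_real_folders is not None:
--                 stolen = any(
--                     f != folder and method.startswith(f + "_") and len(f) > len(folder)
--                     for f in all_real_folders
--                 )
--                 if stolen:
--                     continue
--             return folder, method[len(prefix):]
--         if method == folder:
--             return folder, ""
--     return None
-- ===== SOURCE B (Python) =====
-- def _match_judge_method(
--     method: str,
--     folders: list[str],
--     all_real_folders: set[str] | None = None,
-- ) -> tuple[str, str] | None:
--     """Declarative form: one max() over the real folders, one next() over the
--     candidate folders, and a single uniform result construction (the slice
--     past the end yields "" in the exact-equality case)."""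
--     best = max((len(f) for f in (all_real_folders or ())
--                 if method.startswith(f + "_")), default=-1)
--     hit = next((f for f in folders
--                 if method == f
--                 or (method.startswith(f + "_") and len(f) >= best)), None)
--     return None if hit is None else (hit, method[len(hit) + 1:])
-- ===== Notes on version B (the rewrite author's own statement) =====
-- stated objective: alternative
-- what changed: B replaces A's loop with an inner rescan of all_real_folders by one max() pass computing the longest matching real-folder length, a single next()/find over folders with a pure predicate, and one uniform result construction exploiting that the slice past the end is empty in the exact-match case.
import Mathlib
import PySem

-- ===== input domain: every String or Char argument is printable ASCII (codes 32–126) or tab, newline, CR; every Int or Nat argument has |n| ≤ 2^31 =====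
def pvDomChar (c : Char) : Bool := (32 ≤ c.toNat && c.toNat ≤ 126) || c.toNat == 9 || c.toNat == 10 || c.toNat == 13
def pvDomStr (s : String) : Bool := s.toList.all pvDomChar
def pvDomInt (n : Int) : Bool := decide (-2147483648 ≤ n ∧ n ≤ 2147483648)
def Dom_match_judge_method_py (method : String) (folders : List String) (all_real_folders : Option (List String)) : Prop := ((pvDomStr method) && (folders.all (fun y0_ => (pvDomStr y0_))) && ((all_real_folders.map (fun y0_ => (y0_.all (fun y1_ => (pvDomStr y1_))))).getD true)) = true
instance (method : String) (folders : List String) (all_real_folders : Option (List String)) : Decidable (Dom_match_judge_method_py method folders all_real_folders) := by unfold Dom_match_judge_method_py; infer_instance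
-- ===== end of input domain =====

-- B replaces A's per-folder rescan of all_real_folders by one max() pass, one find over
-- folders with a pure predicate, and a single uniform result construction. Same value.

-- ===== PORT A =====
-- 'folder + "_"' is folder.toList ++ ['_']; 'method[len(prefix):]' with a nonnegative
-- index is List.drop (exact for Python's nonnegative slice); startswith via PySem.Chars.
def pyStolen (method folder : String) (real : List String) : Bool :=
  real.any (fun f =>
    (f != folder) && PySem.Chars.startswith method.toList (f.toList ++ ['_'])
      && decide ((folder.toList.length : Int) < (f.toList.length : Int)))

def matchALoop (method : String) (all_real : Option (List String)) :
    List String → Option (String × String)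
  | [] => none
  | folder :: rest =>
    if PySem.Chars.startswith method.toList (folder.toList ++ ['_']) then
      if (match all_real with
          | none => false
          | some real => pyStolen method folder real) then
        matchALoop method all_real rest          -- 'continue'
      else
        some (folder, String.ofList (method.toList.drop (folder.toList ++ ['_']).length))
    else if method == folder then some (folder, "")
    else matchALoop method all_real rest

def match_judge_method_py (method : String) (folders : List String)
    (all_real_folders : Option (List String)) : Option (String × String) :=
  matchALoop method all_real_folders folders

-- ===== PORT B =====
-- Python's max(generator, default=-1) over the matching real folders, as a fold;
-- 'all_real_folders or ()' is getD [].
def bestB (method : String) (real : List String) : Int :=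
  real.foldl (fun b f =>
    if PySem.Chars.startswith method.toList (f.toList ++ ['_'])
    then max b (f.toList.length : Int) else b) (-1)

-- next(generator, None) over folders = List.find? with the pure predicate.
def findHit (method : String) (best : Int) (folders : List String) : Option String :=
  folders.find? (fun f =>
    (method == f) ||
    (PySem.Chars.startswith method.toList (f.toList ++ ['_'])
      && decide (best ≤ (f.toList.length : Int))))

-- the uniform result construction ('return None if hit is None else (hit, method[len(hit)+1:])')
def match_judge_method_py_alt (method : String) (folders : List String)
    (all_real_folders : Option (List String)) : Option (String × String) :=
  (findHit method (bestB method (all_real_folders.getD [])) folders).map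
    (fun f => (f, String.ofList (method.toList.drop (f.toList.length + 1))))

-- ===== PRECONDITION & SPEC =====
def Spec_match_judge_method_py (method : String) (folders : List String) (all_real_folders : Option (List String)) (out : Option (String × String)) : Prop := out = match_judge_method_py_alt method folders all_real_folders
instance (method : String) (folders : List String) (all_real_folders : Option (List String)) (out : Option (String × String)) : Decidable (Spec_match_judge_method_py method folders all_real_folders out) := by unfold Spec_match_judge_method_py; infer_instance

-- ===== CLAIM =====
def Claim_equal_match_judge_method_py : Prop := ∀ (method : String) (folders : List String) (all_real_folders : Option (List String)), Dom_match_judge_method_py method folders all_real_folders → Spec_match_judge_method_py method folders all_real_folders (match_judge_method_py method folders all_real_folders)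

-- ===== LEMMAS AND PROOFS =====

-- the max-fold's result exceeds L iff the seed does or some matching real folder is longer than L
theorem foldl_best_gt (m : String) (real : List String) (b L : Int) :
    L < real.foldl (fun b f =>
      if PySem.Chars.startswith m.toList (f.toList ++ ['_'])
      then max b (f.toList.length : Int) else b) b
    ↔ L < b ∨ ∃ f ∈ real, PySem.Chars.startswith m.toList (f.toList ++ ['_']) = true
        ∧ L < (f.toList.length : Int) := by
  induction real generalizing b with
  | nil => simp
  | cons f fs ih =>
    rw [List.foldl_cons, ih]
    by_cases hsw : PySem.Chars.startswith m.toList (f.toList ++ ['_']) = true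
    · rw [if_pos hsw]
      constructor
      · rintro (h | ⟨g, hg, h1, h2⟩)
        · rcases lt_max_iff.mp h with h | h
          · exact Or.inl h
          · exact Or.inr ⟨f, List.mem_cons_self, hsw, h⟩
        · exact Or.inr ⟨g, List.mem_cons_of_mem _ hg, h1, h2⟩
      · rintro (h | ⟨g, hg, h1, h2⟩)
        · exact Or.inl (lt_max_iff.mpr (Or.inl h))
        · rcases List.mem_cons.mp hg with rfl | hg'
          · exact Or.inl (lt_max_iff.mpr (Or.inr h2))
          · exact Or.inr ⟨g, hg', h1, h2⟩
    · rw [if_neg hsw]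
      constructor
      · rintro (h | ⟨g, hg, h1, h2⟩)
        · exact Or.inl h
        · exact Or.inr ⟨g, List.mem_cons_of_mem _ hg, h1, h2⟩
      · rintro (h | ⟨g, hg, h1, h2⟩)
        · exact Or.inl h
        · rcases List.mem_cons.mp hg with rfl | hg'
          · exact absurd h1 hsw
          · exact Or.inr ⟨g, hg', h1, h2⟩

theorem stolen_iff (m folder : String) (real : List String) :
    pyStolen m folder real
      = !decide (bestB m real ≤ (folder.toList.length : Int)) := by
  have hgt := foldl_best_gt m real (-1) (folder.toList.length : Int)
  rw [← bestB] at hgt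
  by_cases h : (folder.toList.length : Int) < bestB m real
  · obtain ⟨f, hf, hsw, hlen⟩ : ∃ f ∈ real,
        PySem.Chars.startswith m.toList (f.toList ++ ['_']) = true
          ∧ (folder.toList.length : Int) < (f.toList.length : Int) := by
      rcases hgt.mp h with h' | h'
      · omega
      · exact h'
    have hres : pyStolen m folder real = true := by
      apply List.any_eq_true.mpr
      refine ⟨f, hf, ?_⟩
      have hne : (f != folder) = true := by
        rw [bne_iff_ne]
        intro hEq; rw [hEq] at hlen; omega
      rw [hne, hsw, decide_eq_true hlen]; rfl
    rw [hres, decide_eq_false (by omega : ¬ bestB m real ≤ (folder.toList.length : Int))]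
    rfl
  · have hall : pyStolen m folder real = false := by
      apply List.any_eq_false.mpr
      intro f hf
      by_cases hsw : PySem.Chars.startswith m.toList (f.toList ++ ['_']) = true
      · have hnl : ¬ (folder.toList.length : Int) < (f.toList.length : Int) :=
          fun hl => h (hgt.mpr (Or.inr ⟨f, hf, hsw, hl⟩))
        rw [decide_eq_false hnl]; simp
      · rw [Bool.not_eq_true] at hsw; rw [hsw]; simp
    rw [hall, decide_eq_true (by omega : bestB m real ≤ (folder.toList.length : Int))]
    rfl

-- a prefix match against 'f_' forces method ≠ f (method is strictly longer)
theorem sw_ne (m f : String) (h : PySem.Chars.startswith m.toList (f.toList ++ ['_']) = true) :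
    (m == f) = false := by
  by_contra hc
  rw [Bool.not_eq_false, beq_iff_eq] at hc
  subst hc
  have := (PySem.Chars.startswith_iff _ _).mp h
  have hlen := this.length_le
  simp at hlen

theorem findHit_cons (m : String) (best : Int) (f : String) (fs : List String) :
    findHit m best (f :: fs)
      = if ((m == f) || (PySem.Chars.startswith m.toList (f.toList ++ ['_'])
          && decide (best ≤ (f.toList.length : Int)))) = true
        then some f else findHit m best fs := by
  unfold findHit
  by_cases hp : ((m == f) || (PySem.Chars.startswith m.toList (f.toList ++ ['_'])
      && decide (best ≤ (f.toList.length : Int)))) = true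
  · rw [if_pos hp]; exact List.find?_cons_of_pos (h := hp)
  · rw [if_neg hp]; exact List.find?_cons_of_neg (h := by simpa using hp)

theorem loop_eq (m : String) (r : Option (List String)) (fs : List String) :
    matchALoop m r fs = match_judge_method_py_alt m fs r := by
  unfold match_judge_method_py_alt
  induction fs with
  | nil => rfl
  | cons folder rest ih =>
    simp only [matchALoop]
    rw [findHit_cons]
    by_cases hsw : PySem.Chars.startswith m.toList (folder.toList ++ ['_']) = true
    · rw [if_pos hsw]
      have hne := sw_ne m folder hsw
      cases r with
      | none =>
        rw [if_neg (by simp)]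
        rw [if_pos (by
          rw [hne, hsw]
          simp only [Bool.false_or, Bool.true_and, decide_eq_true_eq, Option.getD_none,
            bestB, List.foldl_nil]
          omega)]
        simp [List.length_append]
      | some real =>
        simp only [stolen_iff, Option.getD_some]
        by_cases hb : bestB m real ≤ ((folder.toList.length : Int))
        · have hb2 : bestB m real ≤ (folder.length : Int) := by simpa using hb
          rw [if_neg (by simp [hb2])]
          rw [if_pos (by rw [hne, hsw]; simpa using hb2)]
          simp [List.length_append]
        · have hb2 : ¬ bestB m real ≤ (folder.length : Int) := by simpa using hb
          rw [if_pos (by simp; omega)]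
          rw [if_neg (by rw [hne, hsw]; simp [hb2])]
          exact ih
    · rw [if_neg hsw]
      by_cases hm : (m == folder) = true
      · rw [if_pos hm, if_pos (by rw [hm]; rfl)]
        have hmf : m = folder := beq_iff_eq.mp hm
        subst hmf
        simp
      · rw [if_neg hm]
        rw [if_neg (by
          simp only [Bool.not_eq_true] at hm hsw
          rw [hm, hsw]
          simp)]
        exact ih

-- ===== VERDICT =====
theorem match_judge_method_py_spec : Claim_equal_match_judge_method_py := by
  intro method folders all_real _
  unfold Spec_match_judge_method_py match_judge_method_py
  exact loop_eq method all_real folders
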